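-- pv_equiv track=rewrite | github.com/javaComSci/Rhythm | Backend/user/routes/partition.py | augment_runs
-- ===== SOURCE A (Python) =====
-- def augment_runs(pr):
-- 	#intitialize staff_lines array
-- 	staff_lines = []
--
-- 	#remove extra rows if entire measure was not in image
-- 	pr = pr[:len(pr) - (len(pr) % 5)]
--
-- 	#group runs by sets of 5 into staff_lines, creating staff lines
-- 	for m in range(0,len(pr),5):
-- 		staff_lines.append(pr[m:m+5])
--
-- 	#for every staff line in staff_lines
-- 	for sl in range(len(staff_lines)):
-- 		#calculate average run distance for a given staff line
-- 		avg_dist = average_run_distance(staff_lines[sl])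
--
-- 		#add row at front and end of list of runs
-- 		staff_lines[sl].insert(0,staff_lines[sl][0] - avg_dist)
-- 		staff_lines[sl].append(staff_lines[sl][len(staff_lines[sl]) - 1] + avg_dist)
--
-- 		#add rows between each previous row of staff line
-- 		list_len = len(staff_lines[sl])
-- 		for d in range(1, list_len):
-- 			# value of new row
-- 			val = staff_lines[sl][2*d - 2] + int(avg_dist/2)
-- 			#insert new row between other two rows
-- 			staff_lines[sl].insert(2*d - 1,val)
--
-- 	return staff_lines
--
-- def average_run_distance(run_list):
-- 	#initialize avgs
-- 	avg = 0
--
-- 	#sum all differences between averages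
-- 	for i in range(len(run_list)-1):
-- 		avg += abs(run_list[i+1] - run_list[i])
--
-- 	num = max(2, len(run_list))
-- 	#divide by number of differences
-- 	avg = float(avg) / (num-1)
--
-- 	return int(avg)
-- ===== SOURCE B (Python) =====
-- def augment_runs(pr):
-- 	out = []
-- 	for m in range(0, len(pr) - len(pr) % 5, 5):
-- 		g = pr[m:m+5]
-- 		avg_dist = sum(abs(g[i+1] - g[i]) for i in range(4)) // 4
-- 		half = avg_dist // 2
-- 		ext = [g[0] - avg_dist] + g + [g[4] + avg_dist]
-- 		line = []
-- 		for x in ext[:-1]: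
-- 			line.append(x)
-- 			line.append(x + half)
-- 		line.append(ext[-1])
-- 		out.append(line)
-- 	return out
-- ===== Notes on version B (the rewrite author's own statement) =====
-- stated objective: simpler
-- what changed: B replaces A's in-place insert-at-odd-positions scheme (inserting midpoints into the growing list it re-reads with 2d-1/2d-2 index arithmetic) by a single forward pass that builds a fresh output from a precomputed padded list [first-avg]+group+[last+avg], appending each element and its midpoint.
import Mathlib
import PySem

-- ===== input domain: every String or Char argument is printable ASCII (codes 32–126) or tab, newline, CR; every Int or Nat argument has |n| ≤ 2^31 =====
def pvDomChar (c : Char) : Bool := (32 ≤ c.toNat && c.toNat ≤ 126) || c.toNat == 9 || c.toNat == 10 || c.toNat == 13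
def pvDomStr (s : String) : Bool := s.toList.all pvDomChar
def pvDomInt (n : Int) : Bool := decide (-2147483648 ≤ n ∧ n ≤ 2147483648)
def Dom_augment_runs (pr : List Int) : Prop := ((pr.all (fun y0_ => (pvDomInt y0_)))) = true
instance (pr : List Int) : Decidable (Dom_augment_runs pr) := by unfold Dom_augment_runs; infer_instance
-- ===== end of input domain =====

-- B replaces A's mutate-and-re-read insert-at-odd-positions scheme by a single forward pass
-- over a precomputed padded list (objective: simpler). Return-value equivalence; A also
-- rebinds its parameter locally, which no caller can observe.

-- ===== PORT A =====
-- port of helper average_run_distance; 'int(float(avg)/(num-1))' is ported as floor division: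
-- exact here because avg ≥ 0 and within augment_runs num-1 is always 4 (a power of two, float-exact)
def pvAvgRunDist (run_list : List Int) : Int :=
  let avg : Int := (PySem.List.pyRange 0 ((run_list.length : Int) - 1) 1).foldl
    (fun a i => a + |PySem.List.pyGetD run_list (i + 1) 0 - PySem.List.pyGetD run_list i 0|) 0
  let num : Int := max 2 (run_list.length : Int)
  PySem.Int.floordiv avg (num - 1)

-- the body of A's 'for sl in range(len(staff_lines))' loop (in-place update of entry sl)
def pvProcessLine (g : List Int) : List Int :=
  let avg := pvAvgRunDist g
  let l1 := PySem.List.insert g 0 (PySem.List.pyGetD g 0 0 - avg)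
  let l2 := l1 ++ [PySem.List.pyGetD l1 ((l1.length : Int) - 1) 0 + avg]
  let list_len : Int := (l2.length : Int)
  -- 'int(avg_dist/2)' ported as floor division: exact since avg ≥ 0 and 2 is a power of two
  (PySem.List.pyRange 1 list_len 1).foldl
    (fun l d => PySem.List.insert l (2 * d - 1)
      (PySem.List.pyGetD l (2 * d - 2) 0 + PySem.Int.floordiv avg 2)) l2

def augment_runs (pr : List Int) : List (List Int) :=
  let pr2 := PySem.List.slice pr none
    (some ((pr.length : Int) - PySem.Int.mod (pr.length : Int) 5))
  let staff := (PySem.List.pyRange 0 (pr2.length : Int) 5).foldl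
    (fun acc m => acc ++ [PySem.List.slice pr2 (some m) (some (m + 5))]) []
  staff.map pvProcessLine

-- ===== PORT B =====
def pvBuildLine (g : List Int) : List Int :=
  let avg := PySem.Int.floordiv
    (((PySem.List.pyRange 0 4 1).map
      (fun i => |PySem.List.pyGetD g (i + 1) 0 - PySem.List.pyGetD g i 0|)).sum) 4
  let half := PySem.Int.floordiv avg 2
  let ext := [PySem.List.pyGetD g 0 0 - avg] ++ g ++ [PySem.List.pyGetD g 4 0 + avg]
  let line := (PySem.List.slice ext none (some (-1))).foldl
    (fun acc x => acc ++ [x, x + half]) []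
  line ++ [PySem.List.pyGetD ext (-1) 0]

def augment_runs_alt (pr : List Int) : List (List Int) :=
  (PySem.List.pyRange 0 ((pr.length : Int) - PySem.Int.mod (pr.length : Int) 5) 5).foldl
    (fun out m => out ++ [pvBuildLine (PySem.List.slice pr (some m) (some (m + 5)))]) []

-- ===== PRECONDITION & SPEC =====
def Spec_augment_runs (pr : List Int) (out : List (List Int)) : Prop := out = augment_runs_alt pr
instance (pr : List Int) (out : List (List Int)) : Decidable (Spec_augment_runs pr out) := by unfold Spec_augment_runs; infer_instance

-- ===== CLAIM (what is proved, stated in full; the proofs are below) =====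
def Claim_equal_augment_runs : Prop := ∀ (pr : List Int), Dom_augment_runs pr → Spec_augment_runs pr (augment_runs pr)

-- ===== LEMMAS AND PROOFS =====

-- invariant of A's insert-at-odd-positions loop: after the whole loop the list is the
-- original interleaved with midpoints
theorem loopA (v : Int) (ys : List Int) (k : Nat) (hk : k + 1 ≤ ys.length) :
    (PySem.List.pyRange 1 ((k : Int) + 1) 1).foldl
      (fun l d => PySem.List.insert l (2*d-1) (PySem.List.pyGetD l (2*d-2) 0 + v)) ys
    = (ys.take k).flatMap (fun x => [x, x+v]) ++ ys.drop k := by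
  induction k with
  | zero => simp [PySem.List.pyRange_one_eq_nil]
  | succ k ih =>
    have hklt : k < ys.length := by omega
    have h1 : (1:Int) ≤ (k:Int) + 1 := by omega
    rw [show ((k+1 : Nat) : Int) + 1 = ((k:Int)+1) + 1 by push_cast; ring,
        PySem.List.pyRange_one_succ_right h1, List.foldl_append, ih (by omega)]
    simp only [List.foldl_cons, List.foldl_nil]
    set F := (ys.take k).flatMap (fun x => [x, x+v]) with hF
    have hlenF : F.length = 2 * k := by
      simp [hF, List.length_flatMap]; omega
    have e1 : 2*((k:Int)+1)-1 = ((2*k+1 : Nat) : Int) := by push_cast; ring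
    have e2 : 2*((k:Int)+1)-2 = ((2*k : Nat) : Int) := by push_cast; ring
    rw [e1, e2, PySem.List.insert_natCast _ _ _ (by simp [hlenF]; omega),
        PySem.List.pyGetD_natCast]
    rw [List.drop_eq_getElem_cons hklt]
    have hget : (F ++ ys[k] :: ys.drop (k+1)).getD (2*k) 0 = ys[k] := by
      rw [List.getD_eq_getElem _ _ (by simp [hlenF]; omega)]
      simp [List.getElem_append_right, hlenF]
    have htake : (F ++ ys[k] :: ys.drop (k+1)).take (2*k+1) = F ++ [ys[k]] := by
      rw [List.take_append, List.take_of_length_le (by omega)]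
      simp only [hlenF, show 2*k+1-2*k = 1 from by omega, List.take_succ_cons,
        List.take_zero]
    have hdrop : (F ++ ys[k] :: ys.drop (k+1)).drop (2*k+1) = ys.drop (k+1) := by
      rw [List.drop_append, List.drop_of_length_le (by omega)]
      simp only [hlenF, show 2*k+1-2*k = 1 from by omega, List.drop_succ_cons,
        List.drop_zero, List.nil_append]
    rw [hget, htake, hdrop, List.take_add_one, List.getElem?_eq_getElem hklt]
    simp only [Option.toList_some, List.flatMap_append, List.flatMap_cons,
      List.flatMap_nil, List.append_nil, List.append_assoc, List.cons_append,
      List.nil_append]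
    rw [hF]

-- per-group agreement: on a 5-element group both line builders produce the same staff line
theorem pvLine_eq (a b c d e : Int) :
    pvProcessLine [a, b, c, d, e] = pvBuildLine [a, b, c, d, e] := by
  have h04 : PySem.List.pyRange 0 4 1 = [0,1,2,3] := by decide
  have hA : pvAvgRunDist [a,b,c,d,e] = PySem.Int.floordiv (|b-a|+(|c-b|+(|d-c|+|e-d|))) 4 := by
    simp only [pvAvgRunDist, List.length_cons, List.length_nil]
    norm_num [h04, List.foldl_cons, List.foldl_nil, PySem.List.pyGetD,
      show Int.toNat 2 = 2 from rfl, show Int.toNat 3 = 3 from rfl, show Int.toNat 4 = 4 from rfl]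
    congr 1; ring
  set v := PySem.Int.floordiv (|b-a|+(|c-b|+(|d-c|+|e-d|))) 4 with hv
  have hB : (((PySem.List.pyRange 0 4 1).map
      (fun i => |PySem.List.pyGetD [a,b,c,d,e] (i + 1) 0 - PySem.List.pyGetD [a,b,c,d,e] i 0|)).sum) = |b-a|+(|c-b|+(|d-c|+|e-d|)) := by
    norm_num [h04, PySem.List.pyGetD,
      show Int.toNat 2 = 2 from rfl, show Int.toNat 3 = 3 from rfl, show Int.toNat 4 = 4 from rfl]
  -- A side
  rw [pvProcessLine, hA]
  simp only [PySem.List.insert_zero, PySem.List.pyGetD_zero_cons, List.length_cons,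
    List.length_nil, List.length_append]
  rw [show ((6:Nat):Int) - 1 = ((5:Nat):Int) by norm_num,
      show PySem.List.pyGetD ((a - v) :: [a,b,c,d,e]) ((5:Nat):Int) 0 = e by
        rw [PySem.List.pyGetD_natCast]; rfl]
  rw [show ((0+1+1+1+1+1+1+(0+1) : Nat) : Int) = ((6:Nat):Int)+1 by norm_num]
  rw [loopA (PySem.Int.floordiv v 2) _ 6 (by simp)]
  -- B side
  rw [pvBuildLine, hB]
  simp only [PySem.List.pyGetD_zero_cons, PySem.List.slice_to_neg_one]
  norm_num [PySem.List.pyGetD, show Int.toNat 4 = 4 from rfl, List.foldl_cons, List.foldl_nil]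
  rw [hv, PySem.Int.floordiv_eq_ediv_of_pos (by norm_num : (0:Int) < 4)]
  refine ⟨rfl, by ring, rfl, ?_⟩
  norm_num [PySem.List.pyGet?, PySem.List.pyIdx?, show Int.toNat 6 = 6 from rfl]

theorem pvExists5 (l : List Int) (h : l.length = 5) : ∃ a b c d e, l = [a,b,c,d,e] := by
  match l, h with | [a,b,c,d,e], _ => exact ⟨a,b,c,d,e, rfl⟩

theorem pvOuter (pr : List Int) : augment_runs pr = augment_runs_alt pr := by
  simp only [augment_runs, augment_runs_alt]
  have hK5 : 5 ∣ pr.length - pr.length % 5 := by omega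
  have hKle : pr.length - pr.length % 5 ≤ pr.length := by omega
  rw [show PySem.Int.mod ((pr.length:Int)) 5 = ((pr.length % 5 : Nat):Int) from by
        exact_mod_cast PySem.Int.mod_natCast pr.length 5,
      show (pr.length : Int) - ((pr.length % 5 : Nat) : Int)
         = ((pr.length - pr.length % 5 : Nat) : Int) by
        rw [Int.natCast_sub (Nat.mod_le _ _)],
      PySem.List.slice_to_natCast]
  set K := pr.length - pr.length % 5 with hKdef
  have hlen : (pr.take K).length = K := by simp [List.length_take]; omega
  rw [hlen, PySem.List.foldl_append_singleton_eq_map, PySem.List.foldl_append_singleton_eq_map,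
      List.nil_append, List.nil_append, List.map_map]
  apply List.map_congr_left
  intro m hm
  rw [PySem.List.mem_pyRange_iff_of_pos (by norm_num)] at hm
  obtain ⟨h0, hlt, hdvd⟩ := hm
  obtain ⟨j, hj⟩ : ∃ j : Nat, m = (j : Int) := ⟨m.toNat, (Int.toNat_of_nonneg h0).symm⟩
  subst hj
  have hjK : j + 5 ≤ K := by
    have : (5:Int) ∣ (j:Int) := by simpa using hdvd
    have h5j : 5 ∣ j := by exact_mod_cast this
    have hjlt : j < K := by exact_mod_cast hlt
    omega
  simp only [Function.comp_apply]
  rw [show ((j:Int) + 5) = ((j:Int) + ((5:Nat):Int)) by norm_num,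
      PySem.List.slice_natCast_add, PySem.List.slice_natCast_add]
  have hgrp2 : ((List.take K pr).drop j).take 5 = (pr.drop j).take 5 := by
    rw [List.drop_take, List.take_take]
    congr 1
    omega
  rw [hgrp2]
  obtain ⟨a, b, c, d, e, hge⟩ := pvExists5 ((pr.drop j).take 5) (by
    simp [List.length_take, List.length_drop]; omega)
  rw [hge, pvLine_eq]

-- ===== VERDICT (by name: the statement is the Claim_ definition above) =====
theorem augment_runs_spec : Claim_equal_augment_runs := by
  intro pr _
  unfold Spec_augment_runs
  exact pvOuter pr
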